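-- pv_equiv track=rewrite | github.com/pryang0601/Auto-Table-Operation | wide_to_long.py | select_most_common_patterns
-- ===== SOURCE A (Python) =====
-- def select_most_common_patterns(patterns):
--     # Initialize the variable most_common_count with the count of the first pattern in the list
--     most_common_count = patterns[0][1]
--
--     # Initialize the list most_common_patterns with the name of the first pattern
--     most_common_patterns = [patterns[0][0]]
--
--     # Iterate through the remaining patterns and their counts
--     for pattern, count in patterns[1:]:
--         # If the current pattern's count is the same as most_common_count, add it to most_common_patterns
--         if count == most_common_count:
--             most_common_patterns.append(pattern)
--         else:
--             # If the current pattern's count is different and most_common_patterns contains only one element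
--             if len(most_common_patterns) == 1:
--                 # Update most_common_count to the current pattern's count
--                 most_common_count = count
--                 # Reset most_common_patterns to only contain the current pattern
--                 most_common_patterns = [pattern]
--             else:
--                 # If there is more than one most common pattern, exit the loop
--                 break
--
--     # Return the list most_common_patterns if it contains more than one pattern; otherwise, return an empty list
--     return most_common_patterns if len(most_common_patterns) > 1 else []
-- ===== SOURCE B (Python) =====
-- def _runs(patterns):
--     # split patterns into maximal runs of consecutive equal counts,
--     # keeping only the pattern names of each run
--     if not patterns:
--         return []
--     c = patterns[0][1]
--     k = 1
--     while k < len(patterns) and patterns[k][1] == c: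
--         k += 1
--     return [[name for name, _ in patterns[:k]]] + _runs(patterns[k:])
--
--
-- def select_most_common_patterns(patterns):
--     # return the first run of length > 1, else []
--     for run in _runs(patterns):
--         if len(run) > 1:
--             return run
--     return []
-- ===== Notes on version B (the rewrite author's own statement) =====
-- stated objective: simpler
-- what changed: A's inline accumulate/reset/break state machine is replaced by a group-then-select pass: split the list into maximal runs of consecutive equal counts, then return the first run with more than one name.
import Mathlib
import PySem

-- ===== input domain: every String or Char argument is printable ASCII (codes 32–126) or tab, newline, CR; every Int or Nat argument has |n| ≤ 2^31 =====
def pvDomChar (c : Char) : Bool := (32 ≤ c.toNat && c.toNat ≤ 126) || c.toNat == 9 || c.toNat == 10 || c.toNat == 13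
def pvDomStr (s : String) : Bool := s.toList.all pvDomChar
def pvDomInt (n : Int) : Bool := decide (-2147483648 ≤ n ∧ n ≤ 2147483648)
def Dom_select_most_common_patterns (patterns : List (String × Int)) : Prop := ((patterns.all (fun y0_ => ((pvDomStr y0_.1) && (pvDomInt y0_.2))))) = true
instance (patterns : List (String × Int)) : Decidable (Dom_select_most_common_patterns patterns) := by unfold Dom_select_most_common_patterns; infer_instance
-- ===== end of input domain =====

-- B replaces A's accumulate/reset/break state machine with a group-then-select pass
-- over maximal runs of consecutive equal counts (objective: simpler).


-- ===== PORT A =====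
-- the for-loop over patterns[1:] with state (most_common_count, most_common_patterns);
-- the break returns the accumulator as it stands
def pvGoA : Int → List String → List (String × Int) → List String
  | _, acc, [] => acc
  | mcc, acc, (pattern, count) :: rest =>
    if count == mcc then pvGoA mcc (acc ++ [pattern]) rest
    else if acc.length == 1 then pvGoA count [pattern] rest
    else acc

def select_most_common_patterns (patterns : List (String × Int)) : List String :=
  match patterns with
  | [] => []  -- Python raises IndexError here; excluded by Pre_
  | (p, c) :: rest =>
    let r := pvGoA c [p] rest
    if r.length > 1 then r else []

-- ===== PORT B =====
-- _runs: maximal runs of consecutive equal counts, names only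
def pvRunsB : List (String × Int) → List (List String)
  | [] => []
  | (p, c) :: rest =>
    let grp := rest.takeWhile (fun x => x.2 == c)
    (p :: grp.map Prod.fst) :: pvRunsB (rest.dropWhile (fun x => x.2 == c))
termination_by l => l.length
decreasing_by
  simp only [List.length_cons]
  exact Nat.lt_succ_of_le (List.length_dropWhile_le _ _)

def select_most_common_patterns_alt (patterns : List (String × Int)) : List String :=
  match (pvRunsB patterns).find? (fun run => run.length > 1) with
  | some run => run
  | none => []

-- ===== PRECONDITION & SPEC =====
-- Python A evaluates patterns[0] and raises IndexError on the empty list.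
def Pre_select_most_common_patterns (patterns : List (String × Int)) : Prop := patterns ≠ []
instance (patterns : List (String × Int)) : Decidable (Pre_select_most_common_patterns patterns) := by unfold Pre_select_most_common_patterns; infer_instance
def pvWitness_select_most_common_patterns : (List (String × Int)) := [("a", 2), ("b", 2), ("c", 1)]

def Spec_select_most_common_patterns (patterns : List (String × Int)) (out : List String) : Prop := out = select_most_common_patterns_alt patterns
instance (patterns : List (String × Int)) (out : List String) : Decidable (Spec_select_most_common_patterns patterns out) := by unfold Spec_select_most_common_patterns; infer_instance

-- ===== CLAIM (what is proved, stated in full; the proofs are below) =====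
def Claim_equal_select_most_common_patterns : Prop := ∀ (patterns : List (String × Int)), Dom_select_most_common_patterns patterns → Pre_select_most_common_patterns patterns → Spec_select_most_common_patterns patterns (select_most_common_patterns patterns)
-- ===== LEMMAS AND PROOFS =====

-- consuming a run of equal counts just appends its names to the accumulator
theorem pvGoA_run (c : Int) (grp rest' : List (String × Int)) (acc : List String)
    (h : ∀ x ∈ grp, x.2 = c) :
    pvGoA c acc (grp ++ rest') = pvGoA c (acc ++ grp.map Prod.fst) rest' := by
  induction grp generalizing acc with
  | nil => simp
  | cons hd tl ih =>
    have hc : hd.2 = c := h hd (by simp)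
    simp only [List.cons_append, pvGoA, hc]
    rw [if_pos (by simp)]
    rw [ih _ (fun x hx => h x (by simp [hx]))]
    simp

theorem main_eq (patterns : List (String × Int)) :
    select_most_common_patterns patterns = select_most_common_patterns_alt patterns := by
  induction patterns using pvRunsB.induct with
  | case1 => simp [select_most_common_patterns, select_most_common_patterns_alt, pvRunsB]
  | case2 p c rest ih =>
    have hsplit := List.takeWhile_append_dropWhile (p := fun x : String × Int => x.2 == c) (l := rest)
    have hmem : ∀ x ∈ rest.takeWhile (fun x : String × Int => x.2 == c), x.2 = c := by
      intro x hx
      have := List.mem_takeWhile_imp hx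
      simpa using this
    have hrun : pvGoA c [p] rest
        = pvGoA c ([p] ++ (rest.takeWhile (fun x => x.2 == c)).map Prod.fst)
            (rest.dropWhile (fun x => x.2 == c)) := by
      conv_lhs => rw [← hsplit]
      exact pvGoA_run c _ _ _ hmem
    set grp' := rest.takeWhile (fun x : String × Int => x.2 == c) with hgrp
    set rest' := rest.dropWhile (fun x : String × Int => x.2 == c) with hrest
    have halt : pvRunsB ((p, c) :: rest) = (p :: grp'.map Prod.fst) :: pvRunsB rest' := by
      rw [pvRunsB]
    show (let r := pvGoA c [p] rest; if r.length > 1 then r else [])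
        = select_most_common_patterns_alt ((p, c) :: rest)
    rcases hg : grp' with _ | ⟨g, gs⟩
    · -- empty run: A's accumulator stays [p]
      rcases hr : rest' with _ | ⟨⟨p', c'⟩, rest''⟩
      · rw [hr] at halt
        simp [hrun, hg, hr, pvGoA, select_most_common_patterns_alt, halt, pvRunsB, List.find?]
      · -- next count differs; A resets, which is exactly A on rest'
        have hne : (c' == c) = false := by
          have := List.head?_dropWhile_not (p := fun x : String × Int => x.2 == c) (l := rest)
          rw [← hrest, hr] at this
          simpa using this
        have hstep : pvGoA c [p] rest = pvGoA c' [p'] rest'' := by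
          rw [hrun, hg, hr]
          simp [pvGoA, hne]
        have ihr := ih
        rw [hr] at ihr
        have hA : select_most_common_patterns ((p', c') :: rest'')
            = (let r := pvGoA c' [p'] rest''; if r.length > 1 then r else []) := rfl
        rw [hstep, ← hA, ihr]
        rw [hr] at halt
        simp [select_most_common_patterns_alt, halt, hg]
    · -- nonempty run: length ≥ 2, both sides return it
      have hval : pvGoA c [p] rest = p :: (g :: gs).map Prod.fst := by
        rw [hrun, hg]
        rcases hr : rest' with _ | ⟨⟨p', c'⟩, rest''⟩
        · rfl
        · have hne : (c' == c) = false := by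
            have := List.head?_dropWhile_not (p := fun x : String × Int => x.2 == c) (l := rest)
            rw [← hrest, hr] at this
            simpa using this
          simp [pvGoA, hne]
      simp [hval, select_most_common_patterns_alt, halt, hg]

-- ===== VERDICT (by name: the statement is the Claim_ definition above) =====
theorem select_most_common_patterns_spec : Claim_equal_select_most_common_patterns := by
  intro patterns _ _
  unfold Spec_select_most_common_patterns
  exact main_eq patterns
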